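-- pv_equiv track=rewrite | github.com/pypi-data/pypi-mirror-56 | packages/aios-test/aios-test-0.0.5.tar.gz/aios-test-0.0.5/aios-test/utils/utils.py | cartesian_join
-- ===== SOURCE A (Python) =====
-- import itertools
--
-- def cartesian_join(lbs):
--     # 获取多标签的笛卡儿积组合
--     # input: [{"交通工具": ["摩托", "飞机"]}, {"材质": ["铁", "合金"]}]
--     # output 交通工具.材质, ["摩托.铁", "飞机.铁", "摩托.合金", "飞机.合金"], [[0, 0], [1, 0], [0, 1], [1, 1]]
--     lb_keys = []
--     lb_values = []
--     _lbs = lbs.copy()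
--     while len(_lbs):
--         lb = _lbs.pop(0)
--         while not isinstance(lb, list):
--             lb_keys.append(list(lb)[0])
--             lb = lb.get(list(lb)[0])
--         else:
--             lb_values.append(lb)
--
--     def cov_index(its, lb_values):
--         indexes = []
--         for index, it in enumerate(its):
--             indexes.append(lb_values[index].index(it))
--         return indexes
--
--     label_comps = ['.'.join(item) for item in itertools.product(*lb_values)]
--     label_indexes = [cov_index(item, lb_values) for item in itertools.product(*lb_values)]
--     return lb_keys, label_comps, label_indexes
-- ===== SOURCE B (Python) =====
-- def cartesian_join(lbs):
--     # One fold over the value lists builds components and indexes together,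
--     # using a value->first-index dict instead of repeated list.index scans.
--     lb_keys = []
--     lb_values = []
--     for d in lbs:
--         node = d
--         while not isinstance(node, list):   # follow nested dicts, like A
--             k = next(iter(node))
--             lb_keys.append(k)
--             node = node[k]
--         lb_values.append(node)
--     result = [([], [])]
--     for vals in lb_values:
--         first_idx = {}
--         for i, v in enumerate(vals):
--             first_idx.setdefault(v, i)
--         result = [(comps + [v], idxs + [first_idx[v]])
--                   for comps, idxs in result for v in vals]
--     return lb_keys, ['.'.join(c) for c, _ in result], [idxs for _, idxs in result]
-- ===== Notes on version B (the rewrite author's own statement) =====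
-- stated objective: alternative
-- what changed: Replaces itertools.product plus a separate cov_index pass that re-scans each value list with list.index for every product tuple by a single fold that builds each component list and its index list together, looking indices up in a per-label value->first-index dict built once.
import Mathlib
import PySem

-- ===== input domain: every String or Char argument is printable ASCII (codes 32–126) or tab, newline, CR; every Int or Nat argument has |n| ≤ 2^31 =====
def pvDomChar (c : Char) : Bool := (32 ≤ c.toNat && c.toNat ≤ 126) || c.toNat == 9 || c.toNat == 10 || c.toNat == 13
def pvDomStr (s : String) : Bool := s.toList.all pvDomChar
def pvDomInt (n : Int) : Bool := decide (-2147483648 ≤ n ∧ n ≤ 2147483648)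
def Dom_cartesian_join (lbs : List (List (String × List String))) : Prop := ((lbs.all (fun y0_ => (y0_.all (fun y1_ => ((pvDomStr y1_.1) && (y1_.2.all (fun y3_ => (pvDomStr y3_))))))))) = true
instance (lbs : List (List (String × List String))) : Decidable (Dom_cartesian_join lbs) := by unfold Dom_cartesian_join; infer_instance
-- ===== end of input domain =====

-- B replaces product + per-tuple list.index re-scans by one fold building components and
-- indexes together from value->first-index dicts; equivalence proved on non-empty dicts.

-- ===== PORT A =====
-- A's outer 'while len(_lbs)' popping from the front; under the type convention each
-- dict is a flat assoc list, so the inner 'while not isinstance(lb, list)' runs exactly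
-- once per dict (it appends the dict's first key and moves to its value list, which IS a
-- list), then the while-else appends that list. On an empty dict 'list(lb)[0]' raises
-- IndexError: that branch is excluded by Pre_ (the port just skips it).
def pvParseA : List (List (String × List String)) → List String → List (List String) → List String × List (List String)
  | [], keys, values => (keys, values)
  | lb :: rest, keys, values =>
    match lb with
    | [] => pvParseA rest keys values            -- IndexError in Python (outside Pre_)
    | (k, v) :: _ =>                             -- list(lb)[0] = k; lb.get(k) = v (first match)
      pvParseA rest (keys ++ [k]) (values ++ [v])

-- itertools.product(*lb_values): leftmost factor varies slowest
def pvProduct : List (List String) → List (List String)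
  | [] => [[]]
  | l :: ls => l.flatMap (fun x => (pvProduct ls).map (fun t => x :: t))

-- cov_index: for index, it in enumerate(its): indexes.append(lb_values[index].index(it))
-- (lb_values[index] / .index are total here via Option; the 0 default is never
-- reached on A's actual calls, where its comes from the product of lb_values)
def pvCovIndex (its : List String) (lb_values : List (List String)) : List Int :=
  (PySem.List.enumerate its 0).foldl (fun indexes p =>
    indexes ++ [(((PySem.List.pyGet? lb_values p.1).bind
        (fun l => (PySem.List.index? l p.2).map (fun n => (n : Int)))).getD 0)]) []

def cartesian_join (lbs : List (List (String × List String))) : List String × List String × List (List Int) :=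
  let kv := pvParseA lbs [] []
  (kv.1,
   (pvProduct kv.2).map (fun item => PySem.Str.join "." item),
   (pvProduct kv.2).map (fun item => pvCovIndex item kv.2))

-- ===== PORT B =====
-- first_idx = {}; for i, v in enumerate(vals): first_idx.setdefault(v, i)
def pvFirstIdx (vals : List String) : PySem.Dict String Int :=
  (PySem.List.enumerate vals 0).foldl (fun d p => d.setdefault p.2 p.1) PySem.Dict.empty

def cartesian_join_alt (lbs : List (List (String × List String))) : List String × List String × List (List Int) :=
  -- B's parsing for-loop: its inner 'while not isinstance(node, list)' (which in Python
  -- also walks nested dicts, like A) runs exactly once per flat assoc-list dict of this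
  -- type: k = next(iter(d)) (first key; StopIteration on an empty dict, outside Pre_),
  -- d[k] = first match.
  let kv := lbs.foldl (fun acc d =>
      match d with
      | [] => acc
      | (k, v) :: _ => (acc.1 ++ [k], acc.2 ++ [v])) ([], [])
  -- the fold over value lists extending every partial (comps, idxs)
  -- (first_idx[v] never raises since v comes from vals; ported with getD)
  let result := kv.2.foldl (fun res vals =>
      let fi := pvFirstIdx vals
      res.flatMap (fun p => vals.map (fun v =>
        (p.1 ++ [v], p.2 ++ [fi.getD v 0])))) [([], [])]
  (kv.1,
   result.map (fun p => PySem.Str.join "." p.1),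
   result.map (fun p => p.2))

-- ===== PRECONDITION & SPEC =====
-- Pre_ excludes inputs containing an empty dict: there A raises IndexError
-- (list(lb)[0] on an empty dict) and B raises StopIteration.
def Pre_cartesian_join (lbs : List (List (String × List String))) : Prop :=
  ∀ d ∈ lbs, d ≠ []
instance (lbs : List (List (String × List String))) : Decidable (Pre_cartesian_join lbs) := by unfold Pre_cartesian_join; infer_instance

def pvWitness_cartesian_join : (List (List (String × List String))) :=
  [[("veh", ["moto", "plane"])], [("mat", ["iron", "alloy"])]]

def Spec_cartesian_join (lbs : List (List (String × List String))) (out : List String × List String × List (List Int)) : Prop := out = cartesian_join_alt lbs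
instance (lbs : List (List (String × List String))) (out : List String × List String × List (List Int)) : Decidable (Spec_cartesian_join lbs out) := by unfold Spec_cartesian_join; infer_instance

-- ===== CLAIM (what is proved, stated in full; the proofs are below) =====
def Claim_equal_cartesian_join : Prop := ∀ (lbs : List (List (String × List String))), Dom_cartesian_join lbs → Pre_cartesian_join lbs → Spec_cartesian_join lbs (cartesian_join lbs)

-- ===== LEMMAS AND PROOFS =====

-- first index of x in l, 0 if absent (the common value both programs compute)
def pvIdxInt (l : List String) (x : String) : Int :=
  ((PySem.List.index? l x).map (fun n => (n : Int))).getD 0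

-- pointwise indexes of a product tuple against the value lists
def pvZipIdx : List (List String) → List String → List Int
  | l :: ls, x :: xs => pvIdxInt l x :: pvZipIdx ls xs
  | _, _ => []

theorem pvParseA_eq (lbs : List (List (String × List String)))
    (h : ∀ d ∈ lbs, d ≠ []) (ks : List String) (vs : List (List String)) :
    pvParseA lbs ks vs =
      (ks ++ lbs.map (fun d => (d.headD ("", [])).1),
       vs ++ lbs.map (fun d => (d.headD ("", [])).2)) := by
  induction lbs generalizing ks vs with
  | nil => simp [pvParseA]
  | cons d rest ih =>
    rcases d with _ | ⟨⟨k, v⟩, t⟩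
    · exact absurd rfl (h [] (by simp))
    · rw [pvParseA, ih (fun d hd => h d (List.mem_cons_of_mem _ hd)) _ _]
      simp

theorem pvParseB_eq (lbs : List (List (String × List String)))
    (h : ∀ d ∈ lbs, d ≠ []) (ks : List String) (vs : List (List String)) :
    lbs.foldl (fun acc d =>
      match d with
      | [] => acc
      | (k, v) :: _ => (acc.1 ++ [k], acc.2 ++ [v])) (ks, vs) =
      (ks ++ lbs.map (fun d => (d.headD ("", [])).1),
       vs ++ lbs.map (fun d => (d.headD ("", [])).2)) := by
  induction lbs generalizing ks vs with
  | nil => simp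
  | cons d rest ih =>
    rcases d with _ | ⟨⟨k, v⟩, t⟩
    · exact absurd rfl (h [] (by simp))
    · rw [List.foldl_cons]
      show List.foldl _ (ks ++ [k], vs ++ [v]) rest = _
      rw [ih (fun d hd => h d (List.mem_cons_of_mem _ hd)) _ _]
      simp

theorem pvFirstIdx_aux (l : List String) (s : Int) (d : PySem.Dict String Int) (x : String) :
    ((PySem.List.enumerate l s).foldl (fun d p => d.setdefault p.2 p.1) d).get? x =
      ((d.get? x).or ((PySem.List.index? l x).map (fun n => s + (n : Int)))) := by
  induction l generalizing s d with
  | nil => simp [PySem.List.enumerate_nil, PySem.List.index?_eq_idxOf?]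
  | cons v t ih =>
    rw [PySem.List.enumerate_cons, List.foldl_cons, ih]
    by_cases hx : x = v
    · subst hx
      rw [PySem.List.index?_cons_self, PySem.Dict.get?_setdefault_self]
      rcases hc : d.get? x with _ | w
      · rcases h2 : PySem.List.index? t x with _ | n <;> simp
      · rcases h2 : PySem.List.index? t x with _ | n <;> simp
    · rw [PySem.List.index?_cons_of_ne t (Ne.symm hx), PySem.Dict.get?_setdefault_of_ne d s hx]
      rcases h2 : PySem.List.index? t x with _ | n <;> simp
      rw [show s + 1 + (n : Int) = s + ((n : Int) + 1) by ring]

theorem pvFirstIdx_getD (l : List String) (x : String) :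
    (pvFirstIdx l).getD x 0 = pvIdxInt l x := by
  unfold pvFirstIdx pvIdxInt
  rw [PySem.Dict.getD_eq_get?_getD, pvFirstIdx_aux, PySem.Dict.get?_empty]
  rcases h2 : PySem.List.index? l x with _ | n <;> simp

theorem pvLen_mem_product (vs : List (List String)) (its : List String)
    (h : its ∈ pvProduct vs) : its.length = vs.length := by
  induction vs generalizing its with
  | nil => simp [pvProduct] at h; simp [h]
  | cons l ls ih =>
    simp only [pvProduct, List.mem_flatMap, List.mem_map] at h
    obtain ⟨x, _, t, ht, rfl⟩ := h
    simp [ih t ht]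

theorem pvEnumerate_shift {α : Type} (xs : List α) (s : Int) :
    PySem.List.enumerate xs (s + 1) =
      (PySem.List.enumerate xs s).map (fun p => (p.1 + 1, p.2)) := by
  induction xs generalizing s with
  | nil => simp [PySem.List.enumerate_nil]
  | cons x t ih => rw [PySem.List.enumerate_cons, PySem.List.enumerate_cons, ih]; simp

theorem pvCovIndex_eq (vs : List (List String)) (its : List String)
    (h : its.length = vs.length) : pvCovIndex its vs = pvZipIdx vs its := by
  unfold pvCovIndex
  rw [PySem.List.foldl_append_singleton_eq_map]
  simp only [List.nil_append]
  induction vs generalizing its with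
  | nil =>
    rw [List.length_nil] at h
    rw [List.eq_nil_of_length_eq_zero h]
    simp [PySem.List.enumerate_nil, pvZipIdx]
  | cons l ls ih =>
    rcases its with _ | ⟨x, t⟩
    · simp at h
    · simp only [List.length_cons] at h
      rw [PySem.List.enumerate_cons, List.map_cons, pvEnumerate_shift, List.map_map]
      show _ :: _ = pvIdxInt l x :: pvZipIdx ls t
      congr 1
      · simp [pvIdxInt]
      · rw [← ih t (by omega)]
        apply List.map_congr_left
        intro p hp
        rw [PySem.List.mem_enumerate_iff] at hp
        obtain ⟨k, hk, rfl⟩ := hp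
        simp only [Function.comp]
        rw [show (0:Int) + (k:Int) + 1 = (k:Int) + 1 by ring, PySem.List.pyGet?_cons_succ]
        norm_num

theorem pvFoldB_eq (vs : List (List String)) (res : List (List String × List Int)) :
    vs.foldl (fun res vals =>
      let fi := pvFirstIdx vals
      res.flatMap (fun p => vals.map (fun v =>
        (p.1 ++ [v], p.2 ++ [fi.getD v 0])))) res =
      res.flatMap (fun p => (pvProduct vs).map (fun its =>
        (p.1 ++ its, p.2 ++ pvZipIdx vs its))) := by
  induction vs generalizing res with
  | nil => simp [pvProduct, pvZipIdx]
  | cons l ls ih =>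
    rw [List.foldl_cons, ih]
    simp only [pvProduct, List.flatMap_assoc, List.map_flatMap, List.flatMap_map, List.map_map]
    simp [Function.comp_def, pvZipIdx, pvFirstIdx_getD]

-- ===== VERDICT (by name: the statement is the Claim_ definition above) =====
theorem cartesian_join_spec : Claim_equal_cartesian_join := by
  intro lbs _ hpre
  unfold Spec_cartesian_join cartesian_join cartesian_join_alt
  rw [pvParseA_eq lbs hpre, pvParseB_eq lbs hpre]
  simp only [List.nil_append]
  rw [pvFoldB_eq]
  simp only [List.flatMap_cons, List.flatMap_nil, List.append_nil, List.nil_append, List.map_map]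
  refine Prod.ext rfl (Prod.ext rfl ?_)
  apply List.map_congr_left
  intro its hits
  exact pvCovIndex_eq _ _ (pvLen_mem_product _ _ hits)
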